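-- pv_equiv track=rewrite | github.com/LightspeedDMS/code-indexer | tests/unit/server/web/test_auto_discovery_remove_repo_868.py | _aria_label_contains_repo_name
-- ===== SOURCE A (Python) =====
-- _ARIA_LABEL_VALUE_SCAN_CHARS = 80
--
-- def _aria_label_contains_repo_name(function_body: str) -> bool:
--     """Return True if an aria-label attribute in function_body contains a repo-name expression.
--
--     Scans each occurrence of 'aria-label=' in the body and checks whether the
--     repo-name expression (data.name or escHtml(data.name)) appears within
--     _ARIA_LABEL_VALUE_SCAN_CHARS characters of the attribute start — i.e. inside
--     the attribute value rather than elsewhere in the function.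
--     """
--     search_start = 0
--     while True:
--         pos = function_body.find("aria-label=", search_start)
--         if pos == -1:
--             return False
--         # Scan the window immediately after the attribute name
--         window = function_body[pos : pos + _ARIA_LABEL_VALUE_SCAN_CHARS]
--         if "data.name" in window or "escHtml(data.name)" in window:
--             return True
--         search_start = pos + 1
-- ===== SOURCE B (Python) =====
-- _ARIA_LABEL_VALUE_SCAN_CHARS = 80
--
-- def _aria_label_contains_repo_name(function_body: str) -> bool:
--     """Single left-to-right character scan keeping the most recent attribute start.
--
--     Instead of re-searching with find(), walk each index once: remember the
--     position of the latest 'aria-label=' seen so far; every repo-name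
--     expression the original accepts contains 'data.name', so when 'data.name'
--     starts at the current index it lies in the most recent attribute's 80-char
--     window exactly when i - last <= 80 - len('data.name') = 71.
--     """
--     last = None
--     for i in range(len(function_body)):
--         if function_body.startswith("aria-label=", i):
--             last = i
--         if function_body.startswith("data.name", i):
--             if last is not None and i - last <= _ARIA_LABEL_VALUE_SCAN_CHARS - len("data.name"):
--                 return True
--     return False
-- ===== Notes on version B (the rewrite author's own statement) =====
-- stated objective: alternative
-- what changed: B replaces A's find()-driven while loop over 'aria-label=' occurrences (with an 80-char forward window and a redundant escHtml check) by a single left-to-right index scan that keeps the most recent 'aria-label=' start in an accumulator and, at each 'data.name' start, checks it lies within 71 characters of that accumulator.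
import Mathlib
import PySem

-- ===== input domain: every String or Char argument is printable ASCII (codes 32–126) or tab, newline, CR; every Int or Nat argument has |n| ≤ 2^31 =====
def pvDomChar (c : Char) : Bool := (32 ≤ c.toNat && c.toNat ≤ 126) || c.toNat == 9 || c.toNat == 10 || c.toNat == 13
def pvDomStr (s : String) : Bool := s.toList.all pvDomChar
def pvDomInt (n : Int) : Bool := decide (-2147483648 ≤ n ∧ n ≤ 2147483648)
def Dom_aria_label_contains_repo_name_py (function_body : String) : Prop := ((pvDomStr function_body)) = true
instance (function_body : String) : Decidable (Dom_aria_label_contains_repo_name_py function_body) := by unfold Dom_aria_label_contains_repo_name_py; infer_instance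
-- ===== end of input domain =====

-- B replaces A's find()-driven rescans by one left-to-right index scan that keeps the latest 'aria-label=' start in an accumulator; objective: alternative decomposition.


-- findFrom with a nonnegative start that does not return -1 implies the start is inside the string (used for termination of A's loop)
theorem pvFindFrom_ne_neg_one_le_length (s sub : List Char) (k : Nat)
    (h : PySem.Chars.findFrom s sub (k : Int) ≠ -1) : k ≤ s.length := by
  by_contra hk
  apply h
  simp only [PySem.Chars.findFrom]
  split_ifs <;> omega

-- ===== PORT A =====
-- while-loop of A: find the next 'aria-label=' at or after k, test the 80-char window after it, else continue at pos+1
def pvLoopA (s : List Char) (k : Nat) : Bool :=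
  let pos := PySem.Chars.findFrom s "aria-label=".toList (k : Int)
  if h : pos = -1 then false
  else
    let window := PySem.List.slice s (some pos) (some (pos + 80))
    if PySem.Chars.isIn "data.name".toList window || PySem.Chars.isIn "escHtml(data.name)".toList window
    then true
    else pvLoopA s (pos.toNat + 1)
termination_by s.length + 1 - k
decreasing_by
  have hk : k ≤ s.length := pvFindFrom_ne_neg_one_le_length s _ k h
  have := (PySem.Chars.findFrom_natCast_spec s "aria-label=".toList k hk h).1
  omega

def aria_label_contains_repo_name_py (function_body : String) : Bool :=
  pvLoopA function_body.toList 0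

-- ===== PORT B =====
-- for-loop of B: walk index i with accumulator `last` = position of the latest 'aria-label=' start seen so far
def pvScanB (s : List Char) (i : Nat) (last : Option Nat) : Bool :=
  if i < s.length then
    let last' := if PySem.Chars.startswith (s.drop i) "aria-label=".toList then some i else last
    if PySem.Chars.startswith (s.drop i) "data.name".toList &&
       (match last' with
        | some p => decide (i - p ≤ 71)
        | none => false)
    then true
    else pvScanB s (i + 1) last'
  else false
termination_by s.length - i

def aria_label_contains_repo_name_py_alt (function_body : String) : Bool :=
  pvScanB function_body.toList 0 none

-- ===== PRECONDITION & SPEC =====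
def Spec_aria_label_contains_repo_name_py (function_body : String) (out : Bool) : Prop := out = aria_label_contains_repo_name_py_alt function_body
instance (function_body : String) (out : Bool) : Decidable (Spec_aria_label_contains_repo_name_py function_body out) := by unfold Spec_aria_label_contains_repo_name_py; infer_instance

-- ===== CLAIM (what is proved, stated in full; the proofs are below) =====
def Claim_equal_aria_label_contains_repo_name_py : Prop := ∀ (function_body : String), Dom_aria_label_contains_repo_name_py function_body → Spec_aria_label_contains_repo_name_py function_body (aria_label_contains_repo_name_py function_body)

-- ===== LEMMAS AND PROOFS =====

-- occurrence of a needle at position p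
def pvOcc (sub s : List Char) (p : Nat) : Prop := sub <+: s.drop p

-- the matching condition both programs decide: an 'aria-label=' at p with a 'data.name' at j inside its 80-char window
def pvHit (s : List Char) (p j : Nat) : Prop :=
  pvOcc "aria-label=".toList s p ∧ pvOcc "data.name".toList s j ∧ p ≤ j ∧ j ≤ p + 71

theorem pvNoOcc_of_findFrom_neg (s sub : List Char) (k : Nat) (hsub : sub ≠ [])
    (h : PySem.Chars.findFrom s sub (k : Int) = -1) :
    ∀ p, k ≤ p → ¬ pvOcc sub s p := by
  intro p hp hocc
  by_cases hk : k ≤ s.length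
  · have hnot := (PySem.Chars.findFrom_natCast_eq_neg_one_iff s sub k hk).1 h
    apply hnot
    have : sub <+: (s.drop k).drop (p - k) := by
      rw [List.drop_drop, Nat.add_sub_cancel' hp]; exact hocc
    exact (PySem.Chars.isIn_iff_infix sub (s.drop k)).1
      ((PySem.Chars.exists_prefix_drop_iff_isIn sub (s.drop k)).1 ⟨p - k, this⟩)
  · have : s.drop p = [] := List.drop_eq_nil_of_le (by omega)
    rw [pvOcc, this, List.prefix_nil] at hocc
    exact hsub hocc

-- 'data.name' occurs in the 80-char window starting at p iff it occurs at some p+d with d ≤ 71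
theorem pvWindow_iff (s : List Char) (p : Nat) :
    "data.name".toList <:+: (s.drop p).take 80 ↔ ∃ d, d ≤ 71 ∧ pvOcc "data.name".toList s (p + d) := by
  rw [← PySem.Chars.isIn_iff_infix, ← PySem.Chars.exists_prefix_drop_iff_isIn]
  have hlen : ("data.name".toList).length = 9 := by decide
  constructor
  · rintro ⟨d, hd⟩
    rw [List.drop_take, List.prefix_take_iff, List.drop_drop] at hd
    exact ⟨d, by omega, hd.1⟩
  · rintro ⟨d, hd, hocc⟩
    refine ⟨d, ?_⟩
    rw [List.drop_take, List.prefix_take_iff, List.drop_drop]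
    rw [pvOcc] at hocc
    exact ⟨hocc, by omega⟩

-- A's window test is equivalent to plain 'data.name ∈ window' ('escHtml(data.name)' contains 'data.name')
theorem pvCond_iff (w : List Char) :
    (PySem.Chars.isIn "data.name".toList w || PySem.Chars.isIn "escHtml(data.name)".toList w) = true
      ↔ "data.name".toList <:+: w := by
  rw [Bool.or_eq_true, PySem.Chars.isIn_iff_infix, PySem.Chars.isIn_iff_infix]
  constructor
  · rintro (h | h)
    · exact h
    · exact List.IsInfix.trans (by decide : "data.name".toList <:+: "escHtml(data.name)".toList) h
  · exact Or.inl

theorem pvLoopA_iff_aux (s : List Char) (m : Nat) : ∀ k, s.length + 1 - k ≤ m →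
    (pvLoopA s k = true ↔ ∃ p j, k ≤ p ∧ pvHit s p j) := by
  induction m with
  | zero =>
    intro k hk
    have hneg : PySem.Chars.findFrom s "aria-label=".toList (k : Int) = -1 := by
      by_contra h
      have := pvFindFrom_ne_neg_one_le_length s _ k h
      omega
    rw [pvLoopA, dif_pos hneg]
    simp only [Bool.false_eq_true, false_iff, not_exists]
    rintro p j ⟨hp, hhit⟩
    exact pvNoOcc_of_findFrom_neg s _ k (by decide) hneg p hp hhit.1
  | succ m ih =>
    intro k hk
    rw [pvLoopA]
    by_cases h : PySem.Chars.findFrom s "aria-label=".toList (k : Int) = -1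
    · rw [dif_pos h]
      simp only [Bool.false_eq_true, false_iff, not_exists]
      rintro p j ⟨hp, hhit⟩
      exact pvNoOcc_of_findFrom_neg s _ k (by decide) h p hp hhit.1
    · rw [dif_neg h]
      have hkl : k ≤ s.length := pvFindFrom_ne_neg_one_le_length s _ k h
      obtain ⟨hge, hpre, hmin⟩ := PySem.Chars.findFrom_natCast_spec s "aria-label=".toList k hkl h
      set pos := PySem.Chars.findFrom s "aria-label=".toList (k : Int) with hposdef
      have hpos0 : 0 ≤ pos := le_trans (by omega) hge
      have hwindow : PySem.List.slice s (some pos) (some (pos + 80)) = (s.drop pos.toNat).take 80 := by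
        rw [PySem.List.slice_toNat s hpos0 (by omega)]
        congr 1
        omega
      rw [hwindow]
      by_cases hw : (PySem.Chars.isIn "data.name".toList ((s.drop pos.toNat).take 80)
          || PySem.Chars.isIn "escHtml(data.name)".toList ((s.drop pos.toNat).take 80)) = true
      · rw [if_pos hw]
        obtain ⟨d, hd, hocc⟩ := (pvWindow_iff s pos.toNat).1 ((pvCond_iff _).1 hw)
        constructor
        · intro _
          exact ⟨pos.toNat, pos.toNat + d, by omega, hpre, hocc, by omega, by omega⟩
        · intro _; rfl
      · rw [if_neg hw]
        rw [ih (pos.toNat + 1) (by omega)]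
        constructor
        · rintro ⟨p, j, hp, hhit⟩
          exact ⟨p, j, by omega, hhit⟩
        · rintro ⟨p, j, hp, hhit⟩
          obtain ⟨hA, hD, hple, hjle⟩ := hhit
          refine ⟨p, j, ?_, hA, hD, hple, hjle⟩
          rcases Nat.lt_or_ge p (pos.toNat + 1) with hlt | hge'
          · exfalso
            rcases Nat.lt_or_ge p pos.toNat with hlt' | hge''
            · exact hmin p hp hlt' hA
            · -- p = pos.toNat: the window would have matched
              have hpeq : p = pos.toNat := by omega
              apply hw
              apply (pvCond_iff _).2
              apply (pvWindow_iff s pos.toNat).2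
              refine ⟨j - p, by omega, ?_⟩
              rw [pvOcc] at hD ⊢
              have hj : pos.toNat + (j - p) = j := by omega
              rw [hj]; exact hD
          · exact hge'

theorem pvLoopA_iff (s : List Char) (k : Nat) :
    pvLoopA s k = true ↔ ∃ p j, k ≤ p ∧ pvHit s p j :=
  pvLoopA_iff_aux s (s.length + 1 - k) k le_rfl

-- invariant of B's accumulator: `last` records an 'aria-label=' occurrence below i, and dominates every such occurrence
def pvInv (s : List Char) (i : Nat) (last : Option Nat) : Prop :=
  (∀ p, last = some p → pvOcc "aria-label=".toList s p ∧ p < i) ∧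
  (∀ q, q < i → pvOcc "aria-label=".toList s q → ∃ p, last = some p ∧ q ≤ p)

theorem pvScanB_iff_aux (s : List Char) (m : Nat) : ∀ i last, s.length - i ≤ m →
    pvInv s i last →
    (pvScanB s i last = true ↔ ∃ j p, i ≤ j ∧ pvHit s p j) := by
  induction m with
  | zero =>
    intro i last hm _
    rw [pvScanB, if_neg (by omega)]
    simp only [Bool.false_eq_true, false_iff, not_exists]
    rintro j p ⟨hj, hhit⟩
    have hd : s.drop j = [] := List.drop_eq_nil_of_le (by omega)
    have := hhit.2.1
    rw [pvOcc, hd, List.prefix_nil] at this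
    exact absurd this (by decide)
  | succ m ih =>
    intro i last hm hinv
    by_cases hi : i < s.length
    · rw [pvScanB, if_pos hi]
      simp only []
      set last' := if PySem.Chars.startswith (s.drop i) "aria-label=".toList then some i else last with hl'
      have hinv' : pvInv s (i + 1) last' := by
        by_cases ha : PySem.Chars.startswith (s.drop i) "aria-label=".toList = true
        · rw [hl', if_pos ha]
          constructor
          · rintro p hp
            injection hp with hp; subst hp
            exact ⟨(PySem.Chars.startswith_iff _ _).1 ha, by omega⟩
          · intro q hq hocc
            exact ⟨i, rfl, by omega⟩
        · rw [hl', if_neg ha]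
          constructor
          · intro p hp
            obtain ⟨h1, h2⟩ := hinv.1 p hp
            exact ⟨h1, by omega⟩
          · intro q hq hocc
            rcases Nat.lt_or_ge q i with hlt | hge
            · exact hinv.2 q hlt hocc
            · exfalso
              have : q = i := by omega
              subst this
              exact ha ((PySem.Chars.startswith_iff _ _).2 hocc)
      split_ifs with hc
      · rw [Bool.and_eq_true] at hc
        obtain ⟨hdata, hlast⟩ := hc
        obtain ⟨p, hp, hple⟩ : ∃ p, last' = some p ∧ i - p ≤ 71 := by
          cases hpm : last' with
          | none => rw [hpm] at hlast; simp at hlast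
          | some p => rw [hpm] at hlast; exact ⟨p, rfl, by simpa using hlast⟩
        obtain ⟨hpA, hpi⟩ := hinv'.1 p hp
        constructor
        · intro _
          exact ⟨i, p, le_rfl, hpA, (PySem.Chars.startswith_iff _ _).1 hdata, by omega, by omega⟩
        · intro _; rfl
      · rw [ih (i + 1) last' (by omega) hinv']
        constructor
        · rintro ⟨j, p, hj, hhit⟩
          exact ⟨j, p, by omega, hhit⟩
        · rintro ⟨j, p, hj, hhit⟩
          refine ⟨j, p, ?_, hhit⟩
          rcases Nat.lt_or_ge j (i + 1) with hlt | hge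
          · exfalso
            obtain ⟨hA, hD, hple, hjle⟩ := hhit
            have hji : j = i := by omega
            subst hji
            obtain ⟨pm, hpm, hppm⟩ := hinv'.2 p (by omega) hA
            apply hc
            rw [Bool.and_eq_true, hpm]
            refine ⟨(PySem.Chars.startswith_iff _ _).2 hD, ?_⟩
            simp only [decide_eq_true_eq]
            omega
          · exact hge
    · rw [pvScanB, if_neg hi]
      simp only [Bool.false_eq_true, false_iff, not_exists]
      rintro j p ⟨hj, hhit⟩
      have hd : s.drop j = [] := List.drop_eq_nil_of_le (by omega)
      have := hhit.2.1
      rw [pvOcc, hd, List.prefix_nil] at this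
      exact absurd this (by decide)

theorem pvScanB_iff (s : List Char) :
    pvScanB s 0 none = true ↔ ∃ j p, pvHit s p j := by
  rw [pvScanB_iff_aux s s.length 0 none (by omega)
    ⟨by simp, by omega⟩]
  constructor
  · rintro ⟨j, p, _, h⟩; exact ⟨j, p, h⟩
  · rintro ⟨j, p, h⟩; exact ⟨j, p, Nat.zero_le _, h⟩

-- ===== VERDICT (by name: the statement is the Claim_ definition above) =====
theorem aria_label_contains_repo_name_py_spec : Claim_equal_aria_label_contains_repo_name_py := by
  intro fb _
  unfold Spec_aria_label_contains_repo_name_py aria_label_contains_repo_name_py aria_label_contains_repo_name_py_alt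
  rw [Bool.eq_iff_iff, pvLoopA_iff, pvScanB_iff]
  constructor
  · rintro ⟨p, j, _, hhit⟩
    exact ⟨j, p, hhit⟩
  · rintro ⟨j, p, hhit⟩
    exact ⟨p, j, Nat.zero_le _, hhit⟩
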